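-- pv_equiv track=rewrite | github.com/jeffreyyun/CompetitiveProgrammingProblems | ICPC_Notes/icpc_kattis_2018Fall/leftandright.py | solve
-- ===== SOURCE A (Python) =====
-- def solve(N, S):
--     N = len(S)+1
--     i = 0
--     count = 1
--     res = []
--     while i < N-1:
--         if S[i] == 'R':
--             res.append(count)
--             count += 1
--             i += 1
--         elif S[i] == 'L':
--             prevCount = count
--             while i < N-1 and S[i] == 'L':  # count num of L
--                 count += 1
--                 i += 1
--             res += list(range(count, prevCount-1, -1))    # R is the smallest num
--             count += 1
--             i += 1
--     if S[-1] == 'R':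
--         res.append(count)
--     return res
-- ===== SOURCE B (Python) =====
-- def solve(N, S):
--     # Start from the identity permutation and reverse each maximal block
--     # of consecutive 'L's together with the position just after it.
--     n = len(S)
--     res = list(range(1, n + 2))
--     i = 0
--     while i < n:
--         if S[i] == 'L':
--             j = i
--             while j < n and S[j] == 'L':
--                 j += 1
--             res[i:j + 1] = res[i:j + 1][::-1]
--             i = j + 1
--         else:
--             i += 1
--     return res
-- ===== Notes on version B (the rewrite author's own statement) =====
-- stated objective: alternative
-- what changed: B builds the identity permutation and reverses each maximal 'L'-run block (run plus the following position) in place, instead of A's counter that emits ascending values for 'R' and reversed counted ranges for 'L'-runs.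
-- outside the precondition, e.g. on solve(0, 'LX'): A returns [2, 1], B returns [2, 1, 3]; on solve(0, 'RX'): A does not finish within the time limit, B returns [1, 2, 3]
import Mathlib
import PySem

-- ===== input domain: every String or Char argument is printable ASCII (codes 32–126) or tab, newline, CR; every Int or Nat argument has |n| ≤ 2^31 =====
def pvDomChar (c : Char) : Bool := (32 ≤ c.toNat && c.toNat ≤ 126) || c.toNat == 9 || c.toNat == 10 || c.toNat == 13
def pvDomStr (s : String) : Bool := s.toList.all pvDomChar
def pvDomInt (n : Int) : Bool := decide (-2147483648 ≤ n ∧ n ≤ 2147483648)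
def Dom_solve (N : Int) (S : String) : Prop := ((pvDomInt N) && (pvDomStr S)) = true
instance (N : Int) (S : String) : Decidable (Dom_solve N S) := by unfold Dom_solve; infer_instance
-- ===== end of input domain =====

-- B is an alternative algorithm of the same cost: it reverses maximal 'L'-run blocks of the
-- identity permutation instead of A's counter emitting values / reversed counted ranges.

-- ===== PORT A =====
-- inner `while i < N-1 and S[i] == 'L'`: number of leading 'L's
def spanL : List Char → Nat
  | [] => 0
  | c :: cs => if c == 'L' then 1 + spanL cs else 0

-- A's outer while loop over the remaining characters; state (count, res).
-- In the branch where S[i] is neither 'R' nor 'L' Python loops forever (i never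
-- advances); those inputs are excluded by Pre_solve and the port returns the state there.
def loopA : List Char → Int → List Int → Int × List Int
  | [], count, res => (count, res)
  | c :: rest, count, res =>
    if c == 'R' then loopA rest (count + 1) (res ++ [count])
    else if c == 'L' then
      let k := spanL (c :: rest)                 -- inner while: count += k, i += k
      let res' := res ++ PySem.List.pyRange (count + k) (count - 1) (-1)
      loopA (rest.drop k) (count + k + 1) res'   -- count += 1; i += 1
    else (count, res)
termination_by cs => cs.length
decreasing_by all_goals (simp only [List.length_drop, List.length_cons]; omega)

def solve (N : Int) (S : String) : List Int :=
  let p := loopA S.toList 1 []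
  match PySem.Str.pyGet? S (-1) with              -- S[-1]
  | some c => if c == 'R' then p.2 ++ [p.1] else p.2
  | none => p.2                                   -- empty S: Python raises IndexError (outside Pre_solve)

-- ===== PORT B =====
-- Source B's while loop: walk S and the identity list `res` together; a maximal 'L'-run of
-- length k starting here makes `res[i:j+1] = res[i:j+1][::-1]` reverse the first k+1
-- elements of the remaining part of `res`, and `i = j+1` skips k+1 characters of S.
def revLoop : List Char → List Int → List Int
  | [], res => res
  | c :: cs, res =>
    if c == 'L' then
      let k := spanL (c :: cs)   -- Source B's inner `while j < n and S[j] == 'L'` (same scan as A's)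
      (res.take (k + 1)).reverse ++ revLoop (cs.drop k) (res.drop (k + 1))
    else
      match res with
      | [] => []
      | r :: rs => r :: revLoop cs rs
termination_by cs => cs.length
decreasing_by all_goals (simp only [List.length_drop, List.length_cons]; omega)

def solve_alt (N : Int) (S : String) : List Int :=
  revLoop S.toList (PySem.List.pyRange 1 ((S.toList.length : Int) + 2) 1)   -- list(range(1, n+2))

-- ===== PRECONDITION & SPEC =====
-- Pre_ excludes the empty string (A evaluates S[-1] and raises IndexError) and strings with
-- characters other than 'L'/'R': A loops forever when its scan reaches such a character, and
-- returns only accidentally (a truncated result) when the character is skipped after an 'L'-run.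
def Pre_solve (N : Int) (S : String) : Prop :=
  S.toList ≠ [] ∧ S.toList.all (fun c => c == 'L' || c == 'R') = true
instance (N : Int) (S : String) : Decidable (Pre_solve N S) := by unfold Pre_solve; infer_instance

def pvWitness_solve : Int × String := (0, "RL")

def Spec_solve (N : Int) (S : String) (out : List Int) : Prop := out = solve_alt N S
instance (N : Int) (S : String) (out : List Int) : Decidable (Spec_solve N S out) := by unfold Spec_solve; infer_instance

-- ===== CLAIM (what is proved, stated in full; the proofs are below) =====
def Claim_equal_solve : Prop := ∀ (N : Int) (S : String), Dom_solve N S → Pre_solve N S → Spec_solve N S (solve N S)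

-- ===== LEMMAS AND PROOFS =====

-- the common value both sides compute, as a structural recursion over the 'L'/'R' runs
def runOut : List Char → Int → List Int
  | [], count => [count]
  | c :: rest, count =>
    if c == 'L' then
      let k := spanL (c :: rest)
      if k ≤ rest.length then
        PySem.List.pyRange (count + k) (count - 1) (-1) ++ runOut (rest.drop k) (count + k + 1)
      else
        PySem.List.pyRange (count + k) (count - 1) (-1)
    else count :: runOut rest (count + 1)
termination_by cs => cs.length
decreasing_by all_goals (simp only [List.length_drop, List.length_cons]; omega)

theorem spanL_le (l : List Char) : spanL l ≤ l.length := by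
  induction l with
  | nil => simp [spanL]
  | cons c cs ih => simp only [spanL, List.length_cons]; split <;> omega

theorem spanL_all (l : List Char) (h : spanL l = l.length) : ∀ c ∈ l, c = 'L' := by
  induction l with
  | nil => simp
  | cons c cs ih =>
    simp only [spanL, List.length_cons] at h
    by_cases hc : c = 'L'
    · rw [if_pos (by simp [hc])] at h
      intro x hx
      rcases List.mem_cons.mp hx with rfl | h'
      · exact hc
      · exact ih (by omega) x h'
    · rw [if_neg (by simp [hc])] at h
      omega

theorem spanL_getElem (l : List Char) (h : spanL l < l.length) : l[spanL l]'h ≠ 'L' := by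
  induction l with
  | nil => simp at h
  | cons c cs ih =>
    by_cases hc : c = 'L'
    · subst hc
      have hk : spanL ('L' :: cs) = 1 + spanL cs := by simp [spanL]
      have h' : spanL cs < cs.length := by
        simp only [hk, List.length_cons] at h; omega
      have : ('L' :: cs)[spanL ('L' :: cs)]'h = cs[spanL cs]'h' := by
        simp only [hk]
        rw [List.getElem_cons]
        split
        · omega
        · congr 1; omega
      rw [this]; exact ih h'
    · have hk : spanL (c :: cs) = 0 := by simp [spanL, hc]
      simp only [hk, List.getElem_cons_zero]
      exact hc

theorem getLast?_drop_of_ne_nil (l : List Char) (i : Nat) (h : l.drop i ≠ []) :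
    (l.drop i).getLast? = l.getLast? := by
  rw [List.getLast?_eq_getElem?, List.getLast?_eq_getElem?, List.length_drop,
    List.getElem?_drop]
  congr 1
  have : i < l.length := by
    by_contra hc
    exact h (List.drop_eq_nil_of_le (by omega))
  omega

theorem loopA_append (n : Nat) : ∀ (cs : List Char), cs.length ≤ n → ∀ (count : Int) (res : List Int),
    loopA cs count res = ((loopA cs count []).1, res ++ (loopA cs count []).2) := by
  induction n with
  | zero =>
    intro cs h count res
    have : cs = [] := List.eq_nil_of_length_eq_zero (by omega)
    subst this; simp [loopA]
  | succ n IH =>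
    intro cs h count res
    match cs with
    | [] => simp [loopA]
    | c :: rest =>
      by_cases hR : c = 'R'
      · subst hR
        simp only [loopA, if_pos (by decide : ('R' == 'R') = true)]
        rw [IH rest (by simp at h; omega) (count + 1) (res ++ [count]),
            IH rest (by simp at h; omega) (count + 1) ([] ++ [count])]
        simp
      · by_cases hL : c = 'L'
        · subst hL
          simp only [loopA, if_neg (by decide : ¬ ('L' == 'R') = true),
            if_pos (by decide : ('L' == 'L') = true)]
          have hlen : (rest.drop (spanL ('L' :: rest))).length ≤ n := by
            simp only [List.length_drop]; simp at h; omega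
          rw [IH _ hlen (count + ↑(spanL ('L' :: rest)) + 1)
              (res ++ PySem.List.pyRange (count + ↑(spanL ('L' :: rest))) (count - 1) (-1)),
            IH _ hlen (count + ↑(spanL ('L' :: rest)) + 1)
              ([] ++ PySem.List.pyRange (count + ↑(spanL ('L' :: rest))) (count - 1) (-1))]
          simp
        · simp only [loopA, if_neg (by simp [hR] : ¬ (c == 'R') = true),
            if_neg (by simp [hL] : ¬ (c == 'L') = true)]
          simp

theorem A_eq_runOut (n : Nat) : ∀ (cs : List Char), cs.length ≤ n → cs ≠ [] →
    (∀ c ∈ cs, c = 'L' ∨ c = 'R') → ∀ (count : Int),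
    (if cs.getLast? = some 'R' then (loopA cs count []).2 ++ [(loopA cs count []).1]
     else (loopA cs count []).2) = runOut cs count := by
  induction n with
  | zero =>
    intro cs h hne _ _
    exact absurd (List.eq_nil_of_length_eq_zero (by omega)) hne
  | succ n IH =>
    intro cs h hne hok count
    match cs with
    | [] => exact absurd rfl hne
    | c :: rest =>
      have hlenr : rest.length ≤ n := by simp at h; omega
      rcases hok c List.mem_cons_self with hL | hR
      · -- c = 'L'
        subst hL
        simp only [loopA, if_neg (by decide : ¬ (('L' : Char) == 'R') = true),
          if_pos (by decide : (('L' : Char) == 'L') = true)]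
        rw [loopA_append n (rest.drop (spanL ('L' :: rest)))
            (le_trans (by simp only [List.length_drop]; omega) hlenr)
            (count + ↑(spanL ('L' :: rest)) + 1)
            ([] ++ PySem.List.pyRange (count + ↑(spanL ('L' :: rest))) (count - 1) (-1))]
        dsimp only
        have hk1 : spanL ('L' :: rest) = 1 + spanL rest := by simp [spanL]
        have hkle : spanL rest ≤ rest.length := spanL_le rest
        by_cases hcase : spanL ('L' :: rest) ≤ rest.length
        · simp only [runOut, if_pos (by decide : (('L' : Char) == 'L') = true), if_pos hcase]
          by_cases hdropnil : rest.drop (spanL ('L' :: rest)) = []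
          · -- the run ends exactly one position before the end: last char is the skipped 'R'
            have hkeq : spanL ('L' :: rest) = rest.length := by
              have := List.drop_eq_nil_iff.mp hdropnil; omega
            have hlt : spanL ('L' :: rest) < ('L' :: rest).length := by simp only [List.length_cons]; omega
            have hneL := spanL_getElem ('L' :: rest) hlt
            have hlastelem : ('L' :: rest).getLast? = some (('L' :: rest)[spanL ('L' :: rest)]'hlt) := by
              have hidx : ('L' :: rest).length - 1 = spanL ('L' :: rest) := by
                simp only [List.length_cons]; omega
              rw [List.getLast?_eq_getElem?, hidx, List.getElem?_eq_getElem hlt]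
            have hR' : ('L' :: rest)[spanL ('L' :: rest)]'hlt = 'R' := by
              rcases hok _ (List.getElem_mem hlt) with h' | h'
              · exact absurd h' hneL
              · exact h'
            rw [hlastelem, hR', if_pos rfl, hdropnil]
            simp [loopA, runOut]
          · have hlast : ('L' :: rest).getLast? = (rest.drop (spanL ('L' :: rest))).getLast? := by
              rw [getLast?_drop_of_ne_nil rest _ hdropnil]
              match rest, hdropnil with
              | d :: ds, _ => exact List.getLast?_cons_cons
            rw [hlast, ← IH (rest.drop (spanL ('L' :: rest)))
                (le_trans (by simp only [List.length_drop]; omega) hlenr) hdropnil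
                (fun x hx => hok x (List.mem_cons_of_mem _ (List.mem_of_mem_drop hx)))
                (count + ↑(spanL ('L' :: rest)) + 1)]
            split <;> simp
        · -- the whole string is 'L's: no trailing append
          have hall : ∀ x ∈ ('L' :: rest), x = 'L' := spanL_all _ (by simp only [List.length_cons]; omega)
          have hlast : ('L' :: rest).getLast? = some 'L' := by
            rw [List.getLast?_eq_some_getLast (by simp)]
            exact congrArg some (hall _ (List.getLast_mem (by simp)))
          rw [hlast, if_neg (by simp), List.drop_eq_nil_of_le (by omega)]
          simp only [runOut, if_pos (by decide : (('L' : Char) == 'L') = true), if_neg hcase]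
          simp [loopA]
      · -- c = 'R'
        subst hR
        simp only [loopA, if_pos (by decide : (('R' : Char) == 'R') = true)]
        rw [loopA_append n rest hlenr (count + 1) ([] ++ [count])]
        dsimp only
        match rest with
        | [] => simp [loopA, runOut]
        | d :: ds =>
          rw [List.getLast?_cons_cons]
          have hIH := IH (d :: ds) hlenr (by simp)
              (fun x hx => hok x (List.mem_cons_of_mem _ hx)) (count + 1)
          have hrun : runOut ('R' :: d :: ds) count = count :: runOut (d :: ds) (count + 1) := by
            rw [runOut]; simp
          rw [hrun, ← hIH]
          split <;> simp

theorem B_eq_runOut (n : Nat) : ∀ (cs : List Char), cs.length ≤ n →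
    (∀ c ∈ cs, c = 'L' ∨ c = 'R') → ∀ (count : Int),
    revLoop cs (PySem.List.pyRange count (count + (cs.length : Int) + 1) 1) = runOut cs count := by
  induction n with
  | zero =>
    intro cs h _ count
    have : cs = [] := List.eq_nil_of_length_eq_zero (by omega)
    subst this
    rw [revLoop.eq_def]
    simp [runOut, PySem.List.pyRange_one_singleton]
  | succ n IH =>
    intro cs h hok count
    match cs with
    | [] =>
      rw [revLoop.eq_def]
      simp [runOut, PySem.List.pyRange_one_singleton]
    | c :: rest =>
      have hlenr : rest.length ≤ n := by simp at h; omega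
      have hok' : ∀ x ∈ rest, x = 'L' ∨ x = 'R' := fun x hx => hok x (List.mem_cons_of_mem _ hx)
      rcases hok c List.mem_cons_self with hL | hR
      · -- c = 'L'
        subst hL
        rw [revLoop.eq_def]
        dsimp only
        rw [if_pos (by decide : (('L' : Char) == 'L') = true)]
        have hk1 : spanL ('L' :: rest) = 1 + spanL rest := by simp [spanL]
        have hkle : spanL rest ≤ rest.length := spanL_le rest
        by_cases hcase : spanL ('L' :: rest) ≤ rest.length
        · -- the run stops inside the string
          rw [show count + ((('L' :: rest).length : Nat) : Int) + 1 = count + (rest.length : Int) + 2 by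
              simp only [List.length_cons]; push_cast; ring]
          rw [PySem.List.pyRange_one_append count (count + (spanL ('L' :: rest) : Int) + 1)
              (count + (rest.length : Int) + 2) (by push_cast; omega) (by push_cast; omega)]
          have hlen1 : (PySem.List.pyRange count (count + (spanL ('L' :: rest) : Int) + 1) 1).length
              = spanL ('L' :: rest) + 1 := by
            rw [PySem.List.length_pyRange_one]; omega
          rw [List.take_left' hlen1, List.drop_left' hlen1]
          have hdesc : (PySem.List.pyRange count (count + (spanL ('L' :: rest) : Int) + 1) 1).reverse
              = PySem.List.pyRange (count + (spanL ('L' :: rest) : Int)) (count - 1) (-1) := by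
            rw [PySem.List.pyRange_neg_one_eq_reverse, show count - 1 + 1 = count by ring]
          rw [hdesc]
          rw [show count + (rest.length : Int) + 2
              = (count + (spanL ('L' :: rest) : Int) + 1) + (((rest.drop (spanL ('L' :: rest))).length : Nat) : Int) + 1 by
              simp only [List.length_drop]; push_cast; omega]
          rw [IH (rest.drop (spanL ('L' :: rest))) (le_trans (by simp only [List.length_drop]; omega) hlenr)
              (fun x hx => hok' x (List.mem_of_mem_drop hx)) (count + (spanL ('L' :: rest) : Int) + 1)]
          have hrun : runOut ('L' :: rest) count
              = PySem.List.pyRange (count + (spanL ('L' :: rest) : Int)) (count - 1) (-1)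
                ++ runOut (rest.drop (spanL ('L' :: rest))) (count + (spanL ('L' :: rest) : Int) + 1) := by
            rw [runOut]; simp [hcase]
          rw [hrun]
        · -- the whole string is the run: reverse everything
          have hkeq : spanL ('L' :: rest) = rest.length + 1 := by omega
          have hlen : (PySem.List.pyRange count (count + ((('L' :: rest).length : Nat) : Int) + 1) 1).length
              = rest.length + 2 := by
            rw [PySem.List.length_pyRange_one]; simp only [List.length_cons]; omega
          rw [List.take_of_length_le (by rw [hlen]; omega),
            List.drop_eq_nil_of_le (i := spanL ('L' :: rest) + 1) (by rw [hlen]; omega),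
            List.drop_eq_nil_of_le (i := spanL ('L' :: rest)) (show rest.length ≤ spanL ('L' :: rest) by omega)]
          have hdesc : (PySem.List.pyRange count (count + ((('L' :: rest).length : Nat) : Int) + 1) 1).reverse
              = PySem.List.pyRange (count + (spanL ('L' :: rest) : Int)) (count - 1) (-1) := by
            rw [PySem.List.pyRange_neg_one_eq_reverse, show count - 1 + 1 = count by ring]
            congr 2
            simp only [List.length_cons]
            push_cast [hkeq]; ring
          rw [hdesc]
          have hrun : runOut ('L' :: rest) count
              = PySem.List.pyRange (count + (spanL ('L' :: rest) : Int)) (count - 1) (-1) := by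
            rw [runOut]; simp [hcase]
          rw [hrun, revLoop.eq_def]
          simp
      · -- c = 'R'
        subst hR
        have hcons : PySem.List.pyRange count (count + ((('R' :: rest).length : Nat) : Int) + 1) 1
            = count :: PySem.List.pyRange (count + 1) ((count + 1) + (rest.length : Int) + 1) 1 := by
          rw [show count + ((('R' :: rest).length : Nat) : Int) + 1 = (count + 1) + (rest.length : Int) + 1 from by
              simp only [List.length_cons]; push_cast; ring]
          exact PySem.List.pyRange_one_cons (by omega)
        rw [hcons, revLoop.eq_def]
        dsimp only
        rw [if_neg (by decide : ¬ (('R' : Char) == 'L') = true)]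
        have hrun : runOut ('R' :: rest) count = count :: runOut rest (count + 1) := by
          rw [runOut]; simp
        rw [hrun]
        exact congrArg _ (IH rest hlenr hok' (count + 1))

-- ===== VERDICT (by name: the statement is the Claim_ definition above) =====
theorem solve_spec : Claim_equal_solve := by
  intro N S _ hPre
  unfold Spec_solve solve solve_alt
  obtain ⟨hne, hall⟩ := hPre
  have hok : ∀ c ∈ S.toList, c = 'L' ∨ c = 'R' := by
    intro c hc
    have h' := List.all_eq_true.mp hall c hc
    simpa using h' 
  have hget : PySem.Str.pyGet? S (-1) = S.toList.getLast? := by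
    simp [PySem.List.pyGet?_neg_one]
  rw [hget]
  have hA := A_eq_runOut S.toList.length S.toList le_rfl hne hok 1
  have hB := B_eq_runOut S.toList.length S.toList le_rfl hok 1
  have hrange : PySem.List.pyRange 1 ((S.toList.length : Int) + 2) 1
      = PySem.List.pyRange 1 (1 + (S.toList.length : Int) + 1) 1 := by ring_nf
  rw [hrange, hB]
  rcases hx : S.toList.getLast? with _ | c
  · exact absurd (List.getLast?_eq_none_iff.mp hx) hne
  · rw [hx] at hA
    by_cases hc : c = 'R'
    · subst hc
      simpa using hA
    · have : ¬ (some c = some 'R') := by simp [hc]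
      rw [if_neg this] at hA
      simpa [hc] using hA
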